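-- pv_equiv track=rewrite | github.com/tiggerwu/Learning-Material | 人工智能理论与应用/Homework2/agent.py | opp_eval
-- ===== SOURCE A (Python) =====
-- def opp_eval(opp_pos, player):
--     partial_eval = 0
--     if player == 2:
--         for chess in opp_pos:
--             partial_eval += chess[0]
--     else:
--         for chess in opp_pos:
--             partial_eval += 20 - chess[0]
--     return partial_eval
-- ===== SOURCE B (Python) =====
-- def opp_eval(opp_pos, player):
--     def val(x):
--         return x if player == 2 else 20 - x
--
--     def dc(lo, hi):
--         if hi - lo == 0:
--             return 0
--         if hi - lo == 1:
--             return val(opp_pos[lo][0])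
--         mid = (lo + hi) // 2
--         return dc(lo, mid) + dc(mid, hi)
--
--     return dc(0, len(opp_pos))
-- ===== Notes on version B (the rewrite author's own statement) =====
-- stated objective: alternative
-- what changed: Replaces A's linear two-branch accumulator loop with a balanced divide-and-conquer recursion over index ranges that splits the list in halves and adds the transformed values at the leaves (correct because integer addition is associative, so any summation order gives the same total).
import Mathlib
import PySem

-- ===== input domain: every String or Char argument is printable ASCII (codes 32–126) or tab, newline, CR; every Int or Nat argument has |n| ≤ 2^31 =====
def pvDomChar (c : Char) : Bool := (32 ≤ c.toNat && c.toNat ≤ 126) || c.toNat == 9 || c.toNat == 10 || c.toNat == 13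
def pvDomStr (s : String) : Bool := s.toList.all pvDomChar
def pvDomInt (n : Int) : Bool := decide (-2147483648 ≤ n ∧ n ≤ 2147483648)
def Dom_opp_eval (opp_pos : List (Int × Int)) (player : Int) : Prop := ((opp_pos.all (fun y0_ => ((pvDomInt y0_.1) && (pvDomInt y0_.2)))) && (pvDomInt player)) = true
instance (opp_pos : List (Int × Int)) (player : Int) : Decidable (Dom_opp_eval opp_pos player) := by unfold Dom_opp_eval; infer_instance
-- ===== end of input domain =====

-- ===== PORT A =====
-- B replaces A's linear two-branch loop with a balanced divide-and-conquer recursion over index ranges (alternative decomposition, same O(n) cost).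
def opp_eval (opp_pos : List (Int × Int)) (player : Int) : Int :=
  if player == 2 then
    opp_pos.foldl (fun acc chess => acc + chess.1) 0
  else
    opp_pos.foldl (fun acc chess => acc + (20 - chess.1)) 0

-- ===== PORT B =====
-- helper val(x) of Source B
def pvVal (player : Int) (x : Int) : Int := if player == 2 then x else 20 - x

-- helper dc(lo, hi) of Source B; structural recursion on fuel = hi - lo (a totality device only:
-- with fuel ≥ hi - lo it is never exhausted on the calls Source B makes). opp_pos[lo] is always in
-- range on those calls (0 ≤ lo < hi ≤ len is an invariant), so getD's default is never used.
def pvDC (opp_pos : List (Int × Int)) (player : Int) : Nat → Nat → Nat → Int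
  | 0, _, _ => 0
  | fuel + 1, lo, hi =>
    if hi - lo = 0 then 0
    else if hi - lo = 1 then pvVal player (opp_pos.getD lo (0, 0)).1
    else
      pvDC opp_pos player fuel lo ((lo + hi) / 2) + pvDC opp_pos player fuel ((lo + hi) / 2) hi

def opp_eval_alt (opp_pos : List (Int × Int)) (player : Int) : Int :=
  pvDC opp_pos player opp_pos.length 0 opp_pos.length

-- ===== PRECONDITION & SPEC =====
def Spec_opp_eval (opp_pos : List (Int × Int)) (player : Int) (out : Int) : Prop := out = opp_eval_alt opp_pos player
instance (opp_pos : List (Int × Int)) (player : Int) (out : Int) : Decidable (Spec_opp_eval opp_pos player out) := by unfold Spec_opp_eval; infer_instance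

-- ===== CLAIM (what is proved, stated in full; the proofs are below) =====
def Claim_equal_opp_eval : Prop := ∀ (opp_pos : List (Int × Int)) (player : Int), Dom_opp_eval opp_pos player → Spec_opp_eval opp_pos player (opp_eval opp_pos player)

-- ===== LEMMAS AND PROOFS =====

-- prefix sums of transformed values
def pvG (opp_pos : List (Int × Int)) (player : Int) (k : Nat) : Int :=
  ((opp_pos.take k).map (fun c => pvVal player c.1)).sum

lemma pvG_succ (l : List (Int × Int)) (p : Int) (k : Nat) (hk : k < l.length) :
    pvG l p (k + 1) = pvG l p k + pvVal p (l.getD k (0, 0)).1 := by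
  unfold pvG
  rw [List.take_add_one, List.getElem?_eq_getElem hk, List.map_append, List.sum_append]
  simp [List.getD, List.getElem?_eq_getElem hk]

lemma pvDC_eq_G (l : List (Int × Int)) (p : Int) :
    ∀ fuel lo hi, hi - lo ≤ fuel → lo ≤ hi → hi ≤ l.length →
      pvDC l p fuel lo hi = pvG l p hi - pvG l p lo := by
  intro fuel
  induction fuel with
  | zero =>
    intro lo hi hf hlo hhi
    have : hi = lo := by omega
    simp [pvDC, this]
  | succ fuel ih =>
    intro lo hi hf hlo hhi
    rw [pvDC]
    split_ifs with ha hb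
    · have : hi = lo := by omega
      simp [this]
    · have hlt : lo < l.length := by omega
      have : hi = lo + 1 := by omega
      rw [this, pvG_succ l p lo hlt]
      ring
    · rw [ih lo ((lo + hi) / 2) (by omega) (by omega) (by omega),
          ih ((lo + hi) / 2) hi (by omega) (by omega) hhi]
      ring

lemma foldl_add_first (l : List (Int × Int)) (p : Int) (a : Int) :
    l.foldl (fun acc chess => acc + pvVal p chess.1) a
      = a + (l.map (fun c => pvVal p c.1)).sum := by
  induction l generalizing a with
  | nil => simp
  | cons h t ih => simp [List.foldl, ih]; ring

-- ===== VERDICT (by name: the statement is the Claim_ definition above) =====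
theorem opp_eval_spec : Claim_equal_opp_eval := by
  intro opp_pos player _
  unfold Spec_opp_eval opp_eval opp_eval_alt
  have halt : pvDC opp_pos player opp_pos.length 0 opp_pos.length
      = (opp_pos.map (fun c => pvVal player c.1)).sum := by
    rw [pvDC_eq_G opp_pos player opp_pos.length 0 opp_pos.length (by omega) (Nat.zero_le _) le_rfl]
    simp [pvG]
  rw [halt]
  by_cases h : player = 2
  · have := foldl_add_first opp_pos player 0
    simp [pvVal, h] at this ⊢
    simpa using this
  · have := foldl_add_first opp_pos player 0
    simp [pvVal, h] at this ⊢
    simpa using this
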